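-- pv_equiv track=rewrite | github.com/jjanmo/python101 | review/problems/pb05.py | solution
-- ===== SOURCE A (Python) =====
-- def solution(N, M):
--     sums = {}
--     for i in range(1, N + 1):
--         for j in range(1, M + 1):
--             tmp = i + j
--             tmp_value = sums.get(tmp)
--             if tmp_value is None:
--                 sums[tmp] = 0
--             else:
--                 sums[tmp] = tmp_value + 1
--
--     sums = list(sums.items())
--     sums.sort(key=lambda _sum: _sum[1], reverse=True)
--
--     result = []
--     prev = -1
--     for key, value in sums:
--         if prev <= value:
--             result.append(key)
--             prev = value
--         else:
--             break
--
--     return result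
-- ===== SOURCE B (Python) =====
-- def solution(N, M):
--     # The most frequent sums i+j (1<=i<=N, 1<=j<=M) are exactly
--     # min(N,M)+1 .. max(N,M)+1, already in ascending (tie) order.
--     if N < 1 or M < 1:
--         return []
--     return list(range(min(N, M) + 1, max(N, M) + 2))
-- ===== Notes on version B (the rewrite author's own statement) =====
-- stated objective: faster
-- what changed: Replaces the O(N*M) dictionary counting pass plus sort plus scan by the closed form: the maximal-count sums are exactly min(N,M)+1 .. max(N,M)+1, returned directly as a range.
import Mathlib
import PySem

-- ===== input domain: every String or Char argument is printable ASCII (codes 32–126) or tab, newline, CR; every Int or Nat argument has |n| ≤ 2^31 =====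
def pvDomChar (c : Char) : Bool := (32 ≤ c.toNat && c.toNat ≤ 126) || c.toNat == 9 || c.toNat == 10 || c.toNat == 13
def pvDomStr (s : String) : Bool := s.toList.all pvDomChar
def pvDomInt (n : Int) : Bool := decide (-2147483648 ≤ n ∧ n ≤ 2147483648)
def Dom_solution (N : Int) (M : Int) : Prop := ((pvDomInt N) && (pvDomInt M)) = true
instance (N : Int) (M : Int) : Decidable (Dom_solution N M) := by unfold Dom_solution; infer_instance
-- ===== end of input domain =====

-- B replaces A's dict-counting pass, sort and scan by the closed form
-- [min(N,M)+1 .. max(N,M)+1] for the most-frequent sums.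

-- ===== PORT A =====
-- A-side helper: the result loop ('for key, value in sums: if prev <= value: append; else: break')
def solResLoop : List (Int × Int) → Int → List Int
  | [], _ => []
  | (k, v) :: rest, prev => if prev ≤ v then k :: solResLoop rest v else []

def solution (N : Int) (M : Int) : List Int :=
  let sums : PySem.Dict Int Int :=
    (PySem.List.pyRange 1 (N + 1)).foldl (fun d i =>
      (PySem.List.pyRange 1 (M + 1)).foldl (fun d j =>
        match d.get? (i + j) with
        | none => d.insert (i + j) 0
        | some v => d.insert (i + j) (v + 1)) d) PySem.Dict.empty
  let sortedSums := PySem.List.sorted sums.items (fun p => p.2) true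
  solResLoop sortedSums (-1)

-- ===== PORT B =====
def solution_alt (N : Int) (M : Int) : List Int :=
  if N < 1 || M < 1 then [] else PySem.List.pyRange (min N M + 1) (max N M + 2)

-- ===== PRECONDITION & SPEC =====
def Spec_solution (N : Int) (M : Int) (out : List Int) : Prop := out = solution_alt N M
instance (N : Int) (M : Int) (out : List Int) : Decidable (Spec_solution N M out) := by unfold Spec_solution; infer_instance

-- ===== CLAIM (what is proved, stated in full; the proofs are below) =====
def Claim_equal_solution : Prop := ∀ (N : Int) (M : Int), Dom_solution N M → Spec_solution N M (solution N M)

-- ===== LEMMAS AND PROOFS =====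

-- the dict-update step of A's inner loop
def dstep (d : PySem.Dict Int Int) (s : Int) : PySem.Dict Int Int :=
  match d.get? s with
  | none => d.insert s 0
  | some v => d.insert s (v + 1)

-- all keys i+j generated by A's nested loops, in generation order
def keyList (N M : Int) : List Int :=
  (PySem.List.pyRange 1 (N + 1)).flatMap (fun i => (PySem.List.pyRange 1 (M + 1)).map (fun j => i + j))

-- the value A stores for key s: (number of pairs (i,j) with i+j=s) minus one
def vfun (N M s : Int) : Int := min N (s - 1) - max 1 (s - M)

lemma nested_eq (N M : Int) (e : PySem.Dict Int Int) :
    (PySem.List.pyRange 1 (N + 1)).foldl (fun d i =>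
      (PySem.List.pyRange 1 (M + 1)).foldl (fun d j => dstep d (i + j)) d) e
    = (keyList N M).foldl dstep e := by
  simp [keyList, List.foldl_flatMap, List.foldl_map]

lemma dstep_eq_modify : dstep = fun d s => d.modify s (-1) (fun v => v + 1) := by
  funext d s
  cases h : d.get? s <;>
    simp [dstep, h, PySem.Dict.modify, PySem.Dict.getD_eq_get?_getD]

lemma getD_dsteps (l : List Int) (d : PySem.Dict Int Int) (v : Int) :
    ((l.foldl dstep d).getD v (-1)) = d.getD v (-1) + l.count v := by
  induction l generalizing d with
  | nil => simp
  | cons x xs ih =>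
    rw [List.foldl_cons, ih, dstep_eq_modify]
    rw [PySem.Dict.getD_modify]
    by_cases hv : v = x
    · subst hv; simp; ring
    · simp [hv, Ne.symm hv]

lemma keys_dsteps (l : List Int) :
    ((l.foldl dstep PySem.Dict.empty).keys) = PySem.Set.ofList l := by
  rw [dstep_eq_modify]
  have := PySem.Dict.keys_foldl_modify l (-1 : Int) (fun _ _ => (fun v => v + 1)) PySem.Dict.empty
  simpa [PySem.Set.ofList, PySem.Set.update] using this

lemma items_dsteps (l : List Int) :
    ((l.foldl dstep PySem.Dict.empty).items)
      = (PySem.Set.ofList l).map (fun k => (k, (l.count k : Int) - 1)) := by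
  have hnd : ((l.foldl dstep PySem.Dict.empty).keys).Nodup := by
    rw [keys_dsteps]; exact PySem.Set.nodup_ofList l
  rw [PySem.Dict.items_eq_map_keys _ hnd (-1), keys_dsteps]
  apply List.map_congr_left
  intro k _
  rw [getD_dsteps]
  simp [PySem.Dict.getD_empty]
  ring

lemma map_add_pyRange (c a b : Int) :
    (PySem.List.pyRange a b).map (fun x => c + x) = PySem.List.pyRange (a + c) (b + c) := by
  simp [PySem.List.pyRange_one, List.map_map]
  intro k _
  ring

lemma row_eq (i M : Int) :
    (PySem.List.pyRange 1 (M + 1)).map (fun j => i + j) = PySem.List.pyRange (1 + i) (M + 1 + i) :=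
  map_add_pyRange i 1 (M + 1)

lemma keyList_succ (n : Nat) (M : Int) :
    keyList ((n : Int) + 1) M = keyList n M ++ PySem.List.pyRange ((n : Int) + 2) ((n : Int) + M + 2) := by
  unfold keyList
  rw [show ((n : Int) + 1 + 1) = ((n : Int) + 1) + 1 by ring,
      PySem.List.pyRange_one_succ_right (a := 1) (b := (n : Int) + 1) (by omega)]
  rw [List.flatMap_append]
  simp [row_eq]
  congr 1 <;> ring

lemma set_update_of_subset (s : PySem.Set Int) (l : List Int) (h : ∀ x ∈ l, x ∈ s) :
    PySem.Set.update s l = s := by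
  induction l generalizing s with
  | nil => rfl
  | cons x xs ih =>
    have hx : PySem.Set.add s x = s := by
      simp [PySem.Set.add, List.contains_eq_mem, h x (by simp)]
    simp only [PySem.Set.update, List.foldl_cons] at *
    rw [hx]
    exact ih s (fun y hy => h y (by simp [hy]))

lemma ofList_append (a b : List Int) :
    PySem.Set.ofList (a ++ b) = PySem.Set.update (PySem.Set.ofList a) b := by
  simp [PySem.Set.ofList, PySem.Set.update, List.foldl_append]

lemma ofList_keyList (N M : Int) (hN : 1 ≤ N) (hM : 1 ≤ M) :
    PySem.Set.ofList (keyList N M) = PySem.List.pyRange 2 (N + M + 1) := by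
  obtain ⟨n, rfl⟩ : ∃ n : Nat, N = (n : Int) + 1 := ⟨(N - 1).toNat, by omega⟩
  clear hN
  induction n with
  | zero =>
    have hrow : keyList ((0:Nat) : Int) M = [] := by
      unfold keyList
      simp [PySem.List.pyRange_one_eq_nil (le_refl 1)]
    rw [keyList_succ 0 M, hrow, List.nil_append]
    rw [PySem.Set.ofList_eq_self_of_nodup _ (PySem.List.nodup_pyRange_one _ _)]
    norm_num
    congr 1
    ring
  | succ n ih =>
    have hc : (((n+1:Nat)) : Int) = ((n:Nat) : Int) + 1 := by push_cast; ring
    rw [keyList_succ (n+1) M, hc, ofList_append, ih]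
    have hsplit : PySem.List.pyRange ((n:Int) + 1 + 2) ((n:Int) + 1 + M + 2)
        = PySem.List.pyRange ((n:Int) + 3) ((n:Int) + M + 2) ++ [(n:Int) + M + 2] := by
      rw [show ((n:Int) + 1 + M + 2) = ((n:Int) + M + 2) + 1 by ring,
          PySem.List.pyRange_one_succ_right (by omega)]
      congr 1
    rw [hsplit]
    rw [show PySem.Set.update (PySem.List.pyRange 2 ((n:Int) + 1 + M + 1))
          (PySem.List.pyRange ((n:Int) + 3) ((n:Int) + M + 2) ++ [(n:Int) + M + 2])
        = PySem.Set.update (PySem.Set.update (PySem.List.pyRange 2 ((n:Int) + 1 + M + 1))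
            (PySem.List.pyRange ((n:Int) + 3) ((n:Int) + M + 2))) [(n:Int) + M + 2] by
      simp [PySem.Set.update, List.foldl_append]]
    have h1 : PySem.Set.update (PySem.List.pyRange 2 ((n:Int) + 1 + M + 1))
        (PySem.List.pyRange ((n:Int) + 3) ((n:Int) + M + 2)) = PySem.List.pyRange 2 ((n:Int) + 1 + M + 1) :=
      set_update_of_subset _ _ (by
        intro x hx
        rw [PySem.List.mem_pyRange_one] at *
        omega)
    rw [h1]
    have hnot : ((n:Int) + M + 2) ∉ PySem.List.pyRange 2 ((n:Int) + 1 + M + 1) := by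
      rw [PySem.List.mem_pyRange_one]; omega
    show PySem.Set.add _ _ = _
    rw [PySem.Set.add, if_neg (by simpa [List.contains_eq_mem] using hnot)]
    rw [show ((n:Int) + 1 + M + 1) = ((n:Int) + M + 2) by ring,
        ← PySem.List.pyRange_one_succ_right (by omega)]
    congr 1
    ring

lemma count_row (i M s : Int) :
    ((PySem.List.pyRange 1 (M + 1)).map (fun j => i + j)).count s
      = if 1 ≤ s - i ∧ s - i < M + 1 then 1 else 0 := by
  have hinj : Function.Injective (fun j : Int => i + j) := fun a b h => by simpa using h
  rw [show s = i + (s - i) by ring, List.count_map_of_injective _ _ hinj]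
  have hsimp : i + (s - i) - i = s - i := by ring
  rw [hsimp]
  by_cases h : 1 ≤ s - i ∧ s - i < M + 1
  · rw [if_pos h]
    exact List.count_eq_one_of_mem (PySem.List.nodup_pyRange_one _ _)
      (by rw [PySem.List.mem_pyRange_one]; exact h)
  · rw [if_neg h, List.count_eq_zero]
    rw [PySem.List.mem_pyRange_one]
    exact h

lemma sum_rows (M s : Int) (hs : 2 ≤ s) : ∀ n : Nat,
    ((PySem.List.pyRange 1 ((n : Int) + 1)).map
        (fun i => if 1 ≤ s - i ∧ s - i < M + 1 then (1 : Nat) else 0)).sum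
      = (min (n : Int) (s - 1) - max 1 (s - M) + 1).toNat := by
  intro n
  induction n with
  | zero => simp [PySem.List.pyRange_one_eq_nil (le_refl 1)]; omega
  | succ n ih =>
    push_cast
    rw [show ((n:Int) + 1 + 1) = ((n:Int) + 1) + 1 by ring,
        PySem.List.pyRange_one_succ_right (by omega),
        List.map_append, List.sum_append, ih]
    simp only [List.map_cons, List.map_nil, List.sum_cons, List.sum_nil]
    split_ifs <;> omega

lemma count_keyList (N M s : Int) (hs : 2 ≤ s) :
    ((keyList N M).count s : Int) = max 0 (min N (s - 1) - max 1 (s - M) + 1) := by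
  unfold keyList
  rw [List.count_flatMap]
  simp only [Function.comp_def, count_row]
  rcases le_or_gt N 0 with hN | hN
  · rw [PySem.List.pyRange_one_eq_nil (by omega)]
    simp
    omega
  · obtain ⟨n, rfl⟩ : ∃ n : Nat, N = (n : Int) := ⟨N.toNat, by omega⟩
    rw [sum_rows M s hs n]
    omega

lemma items_keyList (N M : Int) (hN : 1 ≤ N) (hM : 1 ≤ M) :
    ((keyList N M).foldl dstep PySem.Dict.empty).items
      = (PySem.List.pyRange 2 (N + M + 1)).map (fun s => (s, vfun N M s)) := by
  rw [items_dsteps, ofList_keyList N M hN hM]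
  apply List.map_congr_left
  intro s hs
  rw [PySem.List.mem_pyRange_one] at hs
  rw [count_keyList N M s (by omega)]
  unfold vfun
  congr 1
  omega

-- stability of the reverse insertion sort, per value class
lemma filter_insertBy (c : Int) (x : Int × Int) (ys : List (Int × Int))
    (h : ys.Pairwise (fun a b => b.2 ≤ a.2)) :
    (PySem.List.insertBy (fun a b => decide (b.2 < a.2)) x ys).filter (fun y => y.2 == c)
      = if x.2 = c then ys.filter (fun y => y.2 == c) ++ [x] else ys.filter (fun y => y.2 == c) := by
  induction ys with
  | nil => simp [PySem.List.insertBy]; split_ifs with h1 <;> simp_all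
  | cons y ys ih =>
    rw [List.pairwise_cons] at h
    obtain ⟨hy, hys⟩ := h
    rw [PySem.List.insertBy]
    by_cases hlt : y.2 < x.2
    · simp only [hlt, decide_true, if_true]
      by_cases hxc : x.2 = c
      · -- y.2 < c, and everything in ys is ≤ y.2 < c: tail filter is empty
        have hyc : (y.2 == c) = false := by simp; omega
        have hnil : ys.filter (fun y => y.2 == c) = [] := by
          rw [List.filter_eq_nil_iff]
          intro z hz
          have := hy z hz
          simp
          omega
        simp [hxc, hyc, hnil]
      · simp only [if_neg hxc]
        rw [List.filter_cons_of_neg (by simp [hxc])]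
    · simp only [hlt, decide_false, Bool.false_eq_true, if_false]
      rw [List.filter_cons, ih hys]
      by_cases hyc : (y.2 == c) = true <;> by_cases hxc : x.2 = c <;>
        simp [hyc, hxc]

lemma filter_sorted (xs : List (Int × Int)) (c : Int) :
    (PySem.List.sorted xs (fun p => p.2) true).filter (fun y => y.2 == c)
      = xs.filter (fun y => y.2 == c) := by
  induction xs using List.reverseRecOn with
  | nil => rfl
  | append_singleton xs x ih =>
    rw [PySem.List.sorted_rev_eq_foldl_insertBy, List.foldl_append, List.foldl_cons, List.foldl_nil,
        ← PySem.List.sorted_rev_eq_foldl_insertBy]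
    rw [filter_insertBy c x _ (PySem.List.sorted_pairwise_rev xs (fun p => p.2))]
    rw [ih, List.filter_append]
    split_ifs with hxc <;> simp [hxc]

lemma prefix_decomp (zs : List (Int × Int)) (mx : Int)
    (hp : zs.Pairwise (fun a b => b.2 ≤ a.2)) (hb : ∀ z ∈ zs, z.2 ≤ mx) :
    zs = zs.filter (fun y => y.2 == mx) ++ zs.filter (fun y => !(y.2 == mx)) := by
  induction zs with
  | nil => rfl
  | cons z zs ih =>
    rw [List.pairwise_cons] at hp
    obtain ⟨hz, hzs⟩ := hp
    by_cases hc : z.2 = mx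
    · rw [List.filter_cons_of_pos (by simp [hc]), List.filter_cons_of_neg (by simp [hc])]
      rw [List.cons_append]
      congr 1
      exact ih hzs (fun w hw => hb w (by simp [hw]))
    · have hlt : z.2 < mx := lt_of_le_of_ne (hb z (by simp)) hc
      rw [List.filter_cons_of_neg (by simp [hc]), List.filter_cons_of_pos (by simp [hc])]
      have h1 : zs.filter (fun y => y.2 == mx) = [] := by
        rw [List.filter_eq_nil_iff]
        intro w hw
        have := hz w hw
        simp
        omega
      have h2 : zs.filter (fun y => !(y.2 == mx)) = zs := by
        rw [List.filter_eq_self]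
        intro w hw
        have := hz w hw
        simp
        omega
      rw [h1, h2]
      simp

lemma loop_const (w : Int) (R : List (Int × Int)) :
    ∀ (xs : List Int) (p : Int), p ≤ w →
      solResLoop (xs.map (fun s => (s, w)) ++ R) p
        = xs ++ solResLoop R (if xs = [] then p else w) := by
  intro xs
  induction xs with
  | nil => intro p _; simp
  | cons x xs ih =>
    intro p hp
    simp only [List.map_cons, List.cons_append, solResLoop, if_pos hp]
    rw [ih w (le_refl w)]
    simp only [reduceCtorEq]
    congr 1
    by_cases hxs : xs = [] <;> simp [hxs]

lemma loop_lt (R : List (Int × Int)) (w : Int) (hR : ∀ z ∈ R, z.2 < w) :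
    solResLoop R w = [] := by
  cases R with
  | nil => rfl
  | cons z R =>
    obtain ⟨k, v⟩ := z
    have : v < w := by simpa using hR (k, v) (by simp)
    simp only [solResLoop]
    rw [if_neg (by omega)]

lemma solution_eq_alt (N M : Int) : solution N M = solution_alt N M := by
  simp only [solution]
  rw [show (fun (d : PySem.Dict Int Int) (i : Int) =>
        (PySem.List.pyRange 1 (M + 1)).foldl (fun d j =>
          match d.get? (i + j) with
          | none => d.insert (i + j) 0
          | some v => d.insert (i + j) (v + 1)) d)
      = (fun d i => (PySem.List.pyRange 1 (M + 1)).foldl (fun d j => dstep d (i + j)) d) from rfl]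
  rw [nested_eq]
  by_cases hdeg : N < 1 ∨ M < 1
  · -- no pair is generated: empty dict, empty result on both sides
    have hempty : keyList N M = [] := by
      unfold keyList
      rcases hdeg with h | h
      · rw [PySem.List.pyRange_one_eq_nil (a := 1) (b := N + 1) (by omega)]; rfl
      · rw [PySem.List.pyRange_one_eq_nil (a := 1) (b := M + 1) (by omega)]
        simp
    rw [hempty]
    simp only [List.foldl_nil]
    rw [show (PySem.Dict.empty : PySem.Dict Int Int).items = [] from rfl]
    rw [show PySem.List.sorted ([] : List (Int × Int)) (fun p => p.2) true = [] from rfl]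
    rw [show solResLoop [] (-1) = [] from rfl]
    unfold solution_alt
    rw [if_pos (by simp; omega)]
  · rw [not_or] at hdeg
    simp only [not_lt] at hdeg
    obtain ⟨hN, hM⟩ := hdeg
    rw [items_keyList N M (by omega) (by omega)]
    set m := min N M with hm
    set K := max N M with hK
    set its := (PySem.List.pyRange 2 (N + M + 1)).map (fun s => (s, vfun N M s)) with hits
    have hbound : ∀ z ∈ PySem.List.sorted its (fun p => p.2) true, z.2 ≤ m - 1 := by
      intro z hz
      rw [PySem.List.mem_sorted] at hz
      rw [hits] at hz
      simp only [List.mem_map] at hz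
      obtain ⟨s, hs, rfl⟩ := hz
      rw [PySem.List.mem_pyRange_one] at hs
      simp only [vfun]
      omega
    have hdecomp := prefix_decomp (PySem.List.sorted its (fun p => p.2) true) (m - 1)
      (PySem.List.sorted_pairwise_rev its (fun p => p.2)) hbound
    rw [filter_sorted its (m - 1)] at hdecomp
    -- the maximal-value class of the items is exactly the middle range, in order
    have hsplit : its.filter (fun y => y.2 == m - 1)
        = (PySem.List.pyRange (m + 1) (K + 2)).map (fun s => (s, m - 1)) := by
      rw [hits, List.filter_map]
      have hr : PySem.List.pyRange 2 (N + M + 1)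
          = PySem.List.pyRange 2 (m + 1) ++ (PySem.List.pyRange (m + 1) (K + 2) ++ PySem.List.pyRange (K + 2) (N + M + 1)) := by
        rw [← PySem.List.pyRange_one_append (m + 1) (K + 2) (N + M + 1) (by omega) (by omega),
            ← PySem.List.pyRange_one_append 2 (m + 1) (N + M + 1) (by omega) (by omega)]
      have h1 : List.filter ((fun (y : Int × Int) => y.2 == m - 1) ∘ (fun s => (s, vfun N M s)))
          (PySem.List.pyRange 2 (m + 1)) = [] := by
        rw [List.filter_eq_nil_iff]
        intro s hs
        rw [PySem.List.mem_pyRange_one] at hs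
        simp only [Function.comp_apply, beq_iff_eq, vfun]
        omega
      have h3 : List.filter ((fun (y : Int × Int) => y.2 == m - 1) ∘ (fun s => (s, vfun N M s)))
          (PySem.List.pyRange (K + 2) (N + M + 1)) = [] := by
        rw [List.filter_eq_nil_iff]
        intro s hs
        rw [PySem.List.mem_pyRange_one] at hs
        simp only [Function.comp_apply, beq_iff_eq, vfun]
        omega
      have h2 : List.filter ((fun (y : Int × Int) => y.2 == m - 1) ∘ (fun s => (s, vfun N M s)))
          (PySem.List.pyRange (m + 1) (K + 2)) = PySem.List.pyRange (m + 1) (K + 2) := by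
        rw [List.filter_eq_self]
        intro s hs
        rw [PySem.List.mem_pyRange_one] at hs
        simp only [Function.comp_apply, beq_iff_eq, vfun]
        omega
      rw [hr, List.filter_append, List.filter_append, h1, h2, h3]
      simp only [List.nil_append, List.append_nil]
      apply List.map_congr_left
      intro s hs
      rw [PySem.List.mem_pyRange_one] at hs
      simp only [vfun]
      congr 1
      omega
    rw [hsplit] at hdecomp
    rw [hdecomp]
    set R := (PySem.List.sorted its (fun p => p.2) true).filter (fun y => !(y.2 == m - 1)) with hR
    have hRlt : ∀ z ∈ R, z.2 < m - 1 := by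
      intro z hz
      rw [hR, List.mem_filter] at hz
      obtain ⟨hz1, hz2⟩ := hz
      have := hbound z hz1
      simp at hz2
      omega
    rw [loop_const (m - 1) R _ (-1) (by omega)]
    rw [if_neg (by
      intro hnil
      have : (m + 1 : Int) < K + 2 := by omega
      have hlen := congrArg List.length hnil
      rw [PySem.List.length_pyRange_one] at hlen
      simp at hlen
      omega)]
    rw [loop_lt R (m - 1) hRlt]
    unfold solution_alt
    rw [if_neg (by simp; omega)]
    rw [List.append_nil]

-- ===== VERDICT (by name: the statement is the Claim_ definition above) =====
theorem solution_spec : Claim_equal_solution := by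
  intro N M _
  unfold Spec_solution
  exact solution_eq_alt N M
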